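-- pv_equiv track=rewrite | github.com/gvanerven/dou_transformer | preprocessing_xml.py | break_file_list
-- ===== SOURCE A (Python) =====
-- def break_file_list(file_list, n_jobs):
--     lsts = []
--     len_jobs = n_jobs if len(file_list) >= n_jobs else len(file_list)
--     for i in range(len_jobs):
--         lsts.append([])
--
--     for i, item in enumerate(file_list):
--         lsts[i % len_jobs].append(item)
--
--     for lst in lsts:
--         yield lst
-- ===== SOURCE B (Python) =====
-- def break_file_list(file_list, n_jobs):
--     len_jobs = min(n_jobs, len(file_list))
--     for j in range(len_jobs):
--         yield [file_list[i] for i in range(j, len(file_list), len_jobs)]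
-- ===== Notes on version B (the rewrite author's own statement) =====
-- stated objective: simpler
-- what changed: Instead of pre-building len_jobs empty buckets and scattering each element by index-mod with in-place appends, B directly yields each round-robin bucket as the strided selection file_list[j], file_list[j+len_jobs], ... for j in range(len_jobs).
import Mathlib
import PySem

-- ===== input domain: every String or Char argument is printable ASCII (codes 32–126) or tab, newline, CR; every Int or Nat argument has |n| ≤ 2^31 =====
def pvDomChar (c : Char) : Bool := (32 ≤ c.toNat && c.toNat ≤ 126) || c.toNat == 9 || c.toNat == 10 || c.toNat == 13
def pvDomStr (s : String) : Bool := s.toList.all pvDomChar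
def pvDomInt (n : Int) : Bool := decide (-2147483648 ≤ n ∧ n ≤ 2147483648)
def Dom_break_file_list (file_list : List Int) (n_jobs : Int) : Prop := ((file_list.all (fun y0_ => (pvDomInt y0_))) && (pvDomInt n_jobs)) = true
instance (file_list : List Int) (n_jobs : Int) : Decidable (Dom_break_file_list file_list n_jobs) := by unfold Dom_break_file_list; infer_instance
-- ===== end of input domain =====

-- B yields each round-robin bucket directly as the strided selection file_list[j::len_jobs]
-- instead of A's scatter-by-index-mod into pre-built empty buckets (simpler decomposition; return value only).


-- ===== PORT A =====
-- lsts[i].append(item) as a functional update; pyGetD/pySetD are the total stand-ins,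
-- in range on every input Pre_ admits.
def pyAppendAt (lsts : List (List Int)) (i : Int) (x : Int) : List (List Int) :=
  PySem.List.pySetD lsts i (PySem.List.pyGetD lsts i [] ++ [x])

def break_file_list (file_list : List Int) (n_jobs : Int) : List (List Int) :=
  let len_jobs : Int := if PySem.List.len file_list ≥ n_jobs then n_jobs else PySem.List.len file_list
  let lsts : List (List Int) :=
    (PySem.List.pyRange 0 len_jobs 1).foldl (fun acc _ => acc ++ [([] : List Int)]) []
  (PySem.List.enumerate file_list 0).foldl
    (fun acc p => pyAppendAt acc (PySem.Int.mod p.1 len_jobs) p.2) lsts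

-- ===== PORT B =====
def break_file_list_alt (file_list : List Int) (n_jobs : Int) : List (List Int) :=
  let len_jobs : Int := min n_jobs (PySem.List.len file_list)
  (PySem.List.pyRange 0 len_jobs 1).map (fun j =>
    (PySem.List.pyRange j (PySem.List.len file_list) len_jobs).map
      (fun i => PySem.List.pyGetD file_list i 0))

-- ===== PRECONDITION & SPEC =====
-- On a non-empty file_list with n_jobs ≤ 0 the Python A raises (ZeroDivisionError / IndexError
-- from the i % len_jobs indexing); Pre_ excludes exactly those inputs.
def Pre_break_file_list (file_list : List Int) (n_jobs : Int) : Prop :=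
  file_list = [] ∨ 1 ≤ n_jobs
instance (file_list : List Int) (n_jobs : Int) : Decidable (Pre_break_file_list file_list n_jobs) := by
  unfold Pre_break_file_list; infer_instance

def pvWitness_break_file_list : List Int × Int := ([1, 2, 3, 4, 5], 2)

def Spec_break_file_list (file_list : List Int) (n_jobs : Int) (out : List (List Int)) : Prop := out = break_file_list_alt file_list n_jobs
instance (file_list : List Int) (n_jobs : Int) (out : List (List Int)) : Decidable (Spec_break_file_list file_list n_jobs out) := by unfold Spec_break_file_list; infer_instance

-- ===== CLAIM (what is proved, stated in full; the proofs are below) =====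
def Claim_equal_break_file_list : Prop := ∀ (file_list : List Int) (n_jobs : Int), Dom_break_file_list file_list n_jobs → Pre_break_file_list file_list n_jobs → Spec_break_file_list file_list n_jobs (break_file_list file_list n_jobs)

-- ===== LEMMAS AND PROOFS =====

-- pickA k j xs s: the elements item of xs whose running index i (starting at s) has i % k = j —
-- exactly what A appends to bucket j.
def pickA (k j : Int) : List Int → Int → List Int
  | [], _ => []
  | x :: xs, s => (if PySem.Int.mod s k = j then [x] else []) ++ pickA k j xs (s + 1)

lemma foldl_append_nil (l : List Int) (acc : List (List Int)) :
    l.foldl (fun a _ => a ++ [([] : List Int)]) acc = acc ++ List.replicate l.length [] := by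
  induction l generalizing acc with
  | nil => simp
  | cons x xs ih =>
    rw [List.foldl_cons, ih, List.append_assoc]
    simp [List.replicate_succ]

lemma pyAppendAt_eq (acc : List (List Int)) (m : Int) (x : Int)
    (h0 : 0 ≤ m) (h1 : m < acc.length) :
    pyAppendAt acc m x = acc.mapIdx (fun j b => if (j : Int) = m then b ++ [x] else b) := by
  unfold pyAppendAt
  rw [PySem.List.pySetD_of_nonneg _ _ h0,
      PySem.List.pyGetD_eq_getElem _ _ h0 (by simpa using h1)]
  apply List.ext_getElem
  · simp
  · intro i hi hi'
    simp only [List.getElem_set, List.getElem_mapIdx]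
    by_cases h : m.toNat = i
    · simp [h, show ((i:Int) = m) from by omega]
    · simp [h, show ¬((i:Int) = m) from by omega]

lemma mapIdx_mapIdx' (l : List (List Int)) (f g : Nat → List Int → List Int) :
    (l.mapIdx g).mapIdx f = l.mapIdx (fun i a => f i (g i a)) := by
  apply List.ext_getElem
  · simp
  · intro i hi hi'
    simp [List.getElem_mapIdx]

lemma scatter_spec (k : Nat) (hk : 0 < k) (xs : List Int) :
    ∀ (s : Int) (acc : List (List Int)), acc.length = k →
    (PySem.List.enumerate xs s).foldl
        (fun a p => pyAppendAt a (PySem.Int.mod p.1 (k : Int)) p.2) acc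
      = acc.mapIdx (fun j b => b ++ pickA (k : Int) (j : Int) xs s) := by
  induction xs with
  | nil =>
    intro s acc hlen
    simp [PySem.List.enumerate, pickA]
    exact (by
      apply List.ext_getElem
      · simp
      · intro i hi hi'; simp [List.getElem_mapIdx] : acc = List.mapIdx (fun j b => b) acc)
  | cons x xs ih =>
    intro s acc hlen
    have hk' : (0 : Int) < (k : Int) := by exact_mod_cast hk
    have hm0 : 0 ≤ PySem.Int.mod s (k : Int) := PySem.Int.mod_nonneg s hk'
    have hm1 : PySem.Int.mod s (k : Int) < (k : Int) := PySem.Int.mod_lt s hk'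
    rw [PySem.List.enumerate_cons, List.foldl_cons]
    rw [pyAppendAt_eq acc _ x hm0 (by rw [hlen]; exact hm1)]
    rw [ih (s + 1) _ (by simp [hlen])]
    rw [mapIdx_mapIdx']
    congr 1
    funext j b
    show (if (j : Int) = PySem.Int.mod s (k:Int) then b ++ [x] else b) ++ pickA _ _ xs (s+1)
        = b ++ pickA (k : Int) (j : Int) (x :: xs) s
    rw [show pickA (k : Int) (j : Int) (x :: xs) s
        = (if PySem.Int.mod s (k:Int) = (j:Int) then [x] else []) ++ pickA (k:Int) (j:Int) xs (s+1) from rfl]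
    by_cases h : (j : Int) = PySem.Int.mod s (k : Int)
    · simp [h, List.append_assoc]
    · rw [if_neg h, if_neg (fun hh => h hh.symm)]; simp

lemma mapIdx_replicate_append (K : Nat) (g : Nat → List Int) :
    (List.replicate K ([] : List Int)).mapIdx (fun j b => b ++ g j) = (List.range K).map g := by
  apply List.ext_getElem
  · simp
  · intro i hi hi'
    simp [List.getElem_mapIdx]

-- pyRange with a positive step: nil / cons / shift
lemma pyRange_pos_eq_nil {a b s : Int} (hs : 0 < s) (h : b ≤ a) :
    PySem.List.pyRange a b s = [] := by
  rw [PySem.List.pyRange_of_pos _ _ hs]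
  simp [show ¬ a < b by omega]

lemma pyRange_pos_cons {a b s : Int} (hs : 0 < s) (h : a < b) :
    PySem.List.pyRange a b s = a :: PySem.List.pyRange (a + s) b s := by
  rw [PySem.List.pyRange_of_pos _ _ hs, PySem.List.pyRange_of_pos _ _ hs, if_pos h]
  have e : b - a + s - 1 = b - a - 1 + 1 * s := by ring
  have hr : (b - a + s - 1) / s = (b - a - 1) / s + 1 := by
    rw [e, Int.add_mul_ediv_right _ _ (by omega : s ≠ 0)]
  have hnn : 0 ≤ (b - a - 1) / s := Int.ediv_nonneg (by omega) (by omega)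
  have hcnt : ((b - a + s - 1) / s).toNat = ((b - a - 1) / s).toNat + 1 := by omega
  rw [hcnt, List.range_succ_eq_map, List.map_cons, List.map_map]
  congr 1
  · simp
  · by_cases h2 : a + s < b
    · rw [if_pos h2]
      have hr2 : (b - (a + s) + s - 1) / s = (b - a - 1) / s := by congr 1; ring
      rw [hr2]
      apply List.map_congr_left
      intro t _
      simp [Function.comp]
      ring
    · rw [if_neg h2]
      have hz : (b - a - 1) / s = 0 := Int.ediv_eq_zero_of_lt (by omega) (by omega)
      simp [hz]

lemma pyRange_pos_shift {a b s : Int} (c : Int) (hs : 0 < s) :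
    PySem.List.pyRange (a + c) (b + c) s = (PySem.List.pyRange a b s).map (· + c) := by
  rw [PySem.List.pyRange_of_pos _ _ hs, PySem.List.pyRange_of_pos _ _ hs, List.map_map]
  have e1 : b + c - (a + c) = b - a := by ring
  have e2 : (a + c < b + c) ↔ (a < b) := by omega
  simp only [e1, e2]
  apply List.map_congr_left
  intro t _
  simp [Function.comp]
  ring

lemma pickA_add_k (K : Nat) (hK : 0 < K) (j : Int) (xs : List Int) :
    ∀ s : Int, pickA (K : Int) j xs (s + K) = pickA (K : Int) j xs s := by
  induction xs with
  | nil => intro s; rfl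
  | cons x xs ih =>
    intro s
    have hK' : (0 : Int) < (K : Int) := by exact_mod_cast hK
    show (if PySem.Int.mod (s + K) K = j then [x] else []) ++ pickA (K:Int) j xs (s + K + 1)
       = (if PySem.Int.mod s K = j then [x] else []) ++ pickA (K:Int) j xs (s + 1)
    have hm : PySem.Int.mod (s + K) (K:Int) = PySem.Int.mod s (K:Int) := by
      rw [PySem.Int.mod_eq_emod_of_pos hK', PySem.Int.mod_eq_emod_of_pos hK']
      have h1 := Int.add_mul_emod_self_left (a := s) (b := (K:Int)) (c := 1)
      rw [mul_one] at h1
      exact h1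
    rw [hm, show s + K + 1 = (s + 1) + K by ring, ih (s + 1)]

lemma pickA_append (K j : Int) (ys zs : List Int) :
    ∀ s : Int, pickA K j (ys ++ zs) s = pickA K j ys s ++ pickA K j zs (s + ys.length) := by
  induction ys with
  | nil => intro s; simp [pickA]
  | cons y ys ih =>
    intro s
    show (if PySem.Int.mod s K = j then [y] else []) ++ pickA K j (ys ++ zs) (s + 1)
       = ((if PySem.Int.mod s K = j then [y] else []) ++ pickA K j ys (s + 1)) ++ _
    rw [ih (s + 1), List.append_assoc]
    congr 2
    congr 1
    simp only [List.length_cons]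
    push_cast
    ring

lemma pickA_short (K : Nat) (hK : 0 < K) (j : Nat) (ys : List Int) :
    ∀ s : Nat, s + ys.length ≤ K →
    pickA (K : Int) (j : Int) ys (s : Int)
      = if h : s ≤ j ∧ j < s + ys.length then [ys[j - s]'(by omega)] else [] := by
  induction ys with
  | nil =>
    intro s _
    have hne : ¬(s ≤ j ∧ j < s + ([] : List Int).length) := by
      simp only [List.length_nil]; omega
    rw [dif_neg hne]; rfl
  | cons y ys ih =>
    intro s hle
    have hK' : (0 : Int) < (K : Int) := by exact_mod_cast hK
    have hlen : (y :: ys).length = ys.length + 1 := by simp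
    show (if PySem.Int.mod (s:Int) (K:Int) = (j:Int) then [y] else []) ++ pickA (K:Int) (j:Int) ys ((s:Int) + 1) = _
    have hm : PySem.Int.mod (s:Int) (K:Int) = (s:Int) := by
      rw [PySem.Int.mod_eq_emod_of_pos hK']
      exact Int.emod_eq_of_lt (by omega) (by exact_mod_cast (by simp [hlen] at hle; omega : s < K))
    rw [hm, show ((s:Int) + 1) = ((s+1 : Nat) : Int) by push_cast; ring,
        ih (s+1) (by simp [hlen] at hle ⊢; omega)]
    by_cases h : s = j
    · rw [if_pos (by exact_mod_cast congrArg (Nat.cast : Nat → Int) h),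
          dif_neg (by omega), dif_pos (by simp [hlen]; omega)]
      simp [show j - s = 0 by omega]
    · rw [if_neg (by exact_mod_cast fun hh => h (by exact_mod_cast hh))]
      by_cases h2 : s + 1 ≤ j ∧ j < (s + 1) + ys.length
      · rw [dif_pos h2, dif_pos (by simp [hlen]; omega)]
        have e : j - s = (j - (s + 1)) + 1 := by omega
        simp only [List.nil_append]
        congr 1
        simp only [e, List.getElem_cons_succ]
      · rw [dif_neg h2, dif_neg (by simp [hlen]; omega)]
        simp

lemma stride_lemma (K : Nat) (hK : 0 < K) :
    ∀ (n : Nat) (xs : List Int), xs.length = n → ∀ (j : Nat), j < K →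
    (PySem.List.pyRange (j : Int) (n : Int) (K : Int)).map
        (fun i => PySem.List.pyGetD xs i 0)
      = pickA (K : Int) (j : Int) xs 0 := by
  intro n
  induction n using Nat.strong_induction_on with
  | _ n IH =>
  intro xs hxs j hj
  have hK' : (0 : Int) < (K : Int) := by exact_mod_cast hK
  by_cases hjn : j < n
  · rw [pyRange_pos_cons hK' (by exact_mod_cast hjn), List.map_cons]
    have hhead : PySem.List.pyGetD xs (j : Int) 0 = xs[j]'(by omega) := by
      rw [PySem.List.pyGetD_eq_getElem _ _ (by omega) (by exact_mod_cast (by omega : j < xs.length))]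
      simp
    by_cases hnK : n ≤ K
    · -- short list: the whole xs fits in one row
      rw [pyRange_pos_eq_nil hK' (by exact_mod_cast (by omega : n ≤ j + K)), List.map_nil]
      have hps := pickA_short K hK j xs 0 (by omega)
      simp only [Nat.cast_zero] at hps
      rw [hps, dif_pos (by omega)]
      simp [hhead]
    · -- long list: peel the first row of K elements
      have hsplit : xs = xs.take K ++ xs.drop K := (List.take_append_drop K xs).symm
      have hlt : (xs.take K).length = K := by simp; omega
      conv_rhs => rw [hsplit]
      rw [pickA_append, hlt]
      have hps := pickA_short K hK j (xs.take K) 0 (by omega)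
      simp only [Nat.cast_zero] at hps
      rw [hps, dif_pos (by omega)]
      have htake : (xs.take K)[j - 0]'(by omega) = xs[j]'(by omega) := by
        simp [List.getElem_take]
      rw [htake]
      have hdropn : ((xs.drop K).length : Int) = (n : Int) - (K : Int) := by
        simp [hxs]; omega
      have htail : (PySem.List.pyRange ((j : Int) + K) (n : Int) (K : Int)).map
            (fun i => PySem.List.pyGetD xs i 0)
          = (PySem.List.pyRange (j : Int) (((xs.drop K).length : Nat) : Int) (K : Int)).map
            (fun i => PySem.List.pyGetD (xs.drop K) i 0) := by
        have hn : (n : Int) = ((n : Int) - K) + K := by ring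
        rw [hn, pyRange_pos_shift (K : Int) hK', List.map_map]
        rw [show (((xs.drop K).length : Nat) : Int) = (n : Int) - K from hdropn]
        apply List.map_congr_left
        intro i hi
        have him := (PySem.List.mem_pyRange_iff_of_pos hK' i).mp hi
        have hi0 : 0 ≤ i := by omega
        simp only [Function.comp]
        rw [PySem.List.pyGetD_of_nonneg _ _ (by omega : (0:Int) ≤ i + K),
            PySem.List.pyGetD_of_nonneg _ _ hi0]
        have ht : (i + (K : Int)).toNat = K + i.toNat := by omega
        rw [ht]
        simp [List.getD_eq_getElem?_getD, List.getElem?_drop]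
      rw [htail]
      rw [IH ((xs.drop K).length) (by simp [hxs]; omega) (xs.drop K) rfl j hj]
      have := pickA_add_k K hK (j : Int) (xs.drop K) 0
      simp only [zero_add] at this
      rw [show (0 : Int) + (K : Int) = (K : Int) by ring, ← this]
      simp [List.getElem?_eq_getElem (show j < xs.length by omega)]
  · -- j ≥ n: empty bucket
    rw [pyRange_pos_eq_nil hK' (by exact_mod_cast (by omega : n ≤ j)), List.map_nil]
    have hps := pickA_short K hK j xs 0 (by omega)
    simp only [Nat.cast_zero] at hps
    rw [hps, dif_neg (by omega)]

-- ===== VERDICT (by name: the statement is the Claim_ definition above) =====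
theorem break_file_list_spec : Claim_equal_break_file_list := by
  intro file_list n_jobs _ hpre
  show break_file_list file_list n_jobs = break_file_list_alt file_list n_jobs
  by_cases hfl : file_list = []
  · subst hfl
    unfold break_file_list break_file_list_alt
    simp only [PySem.List.len_eq, List.length_nil, Nat.cast_zero]
    have h1 : PySem.List.pyRange 0 (if (0:Int) ≥ n_jobs then n_jobs else 0) 1 = [] :=
      PySem.List.pyRange_one_eq_nil (by split <;> omega)
    have h2 : PySem.List.pyRange 0 (min n_jobs 0) 1 = [] :=
      PySem.List.pyRange_one_eq_nil (by omega)
    rw [h1, h2]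
    simp [PySem.List.enumerate]
  · have hnj : 1 ≤ n_jobs := by
      rcases hpre with h | h
      · exact absurd h hfl
      · exact h
    have hn : 1 ≤ file_list.length := by
      cases file_list with
      | nil => exact absurd rfl hfl
      | cons a l => simp
    set n := file_list.length with hn_def
    set K : Nat := (min n_jobs (n : Int)).toNat with hK_def
    have hKint : (K : Int) = min n_jobs (n : Int) := by omega
    have hK : 0 < K := by omega
    unfold break_file_list break_file_list_alt
    simp only [PySem.List.len_eq, ← hn_def]
    have hA : (if (n : Int) ≥ n_jobs then n_jobs else (n : Int)) = (K : Int) := by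
      split <;> omega
    rw [hA, hKint.symm]
    have hreplen : (PySem.List.pyRange 0 (K : Int) 1).length = K := by
      rw [PySem.List.length_pyRange_one]; omega
    rw [foldl_append_nil, List.nil_append, hreplen]
    rw [scatter_spec K hK file_list 0 _ (by simp)]
    rw [mapIdx_replicate_append K (fun j => pickA (K : Int) (j : Int) file_list 0)]
    rw [PySem.List.pyRange_one 0 (K : Int)]
    have hKt : ((K : Int) - 0).toNat = K := by omega
    rw [hKt, List.map_map]
    apply List.map_congr_left
    intro t ht
    have htK : t < K := List.mem_range.mp ht
    simp only [Function.comp, zero_add]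
    exact (stride_lemma K hK n file_list rfl t htK).symm
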